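-- pv_equiv track=rewrite | github.com/leolech14/standard-model-of-code | archive/scripts/rearrange_canvas.py | layout_block
-- ===== SOURCE A (Python) =====
-- def layout_block(nodes, start_x, start_y, items_per_col=12):
--     COL_WIDTH = 300
--     ROW_HEIGHT = 220
--
--     current_col = 0
--     current_row = 0
--     max_y = start_y
--
--     for node in nodes:
--         node['x'] = start_x + (current_col * COL_WIDTH)
--         node['y'] = start_y + (current_row * ROW_HEIGHT)
--
--         node_h = node.get('height', ROW_HEIGHT)
--         if node['y'] + node_h > max_y:
--             max_y = node['y'] + node_h
--
--         current_row += 1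
--         if current_row >= items_per_col:
--             current_row = 0
--             current_col += 1
--
--     width = (current_col + 1) * COL_WIDTH
--     return width, max_y
-- ===== SOURCE B (Python) =====
-- def layout_block(nodes, start_x, start_y, items_per_col=12):
--     COL_WIDTH = 300
--     ROW_HEIGHT = 220
--
--     def place(chunk, x):
--         best = start_y
--         for row, node in enumerate(chunk):
--             node['x'] = x
--             node['y'] = start_y + row * ROW_HEIGHT
--             best = max(best, node['y'] + node.get('height', ROW_HEIGHT))
--         return best
--
--     max_y = start_y
--     rest, x = nodes, start_x
--     while rest:
--         max_y = max(max_y, place(rest[:items_per_col], x))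
--         rest, x = rest[items_per_col:], x + COL_WIDTH
--     return (len(nodes) // items_per_col + 1) * COL_WIDTH, max_y
-- ===== Notes on version B (the rewrite author's own statement) =====
-- stated objective: alternative
-- what changed: Replaces A's flat per-node loop with its current_col/current_row counter machine and reset branch by a column-chunking decomposition: repeatedly slice off one column of items_per_col nodes, lay it out with a per-column helper, advance x by one column width, and compute the width in closed form from len(nodes)//items_per_col.
-- outside the precondition, e.g. on layout_block([{}], 0, 0, 0): A returns (600, 220), B does not finish within the time limit
import Mathlib
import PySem

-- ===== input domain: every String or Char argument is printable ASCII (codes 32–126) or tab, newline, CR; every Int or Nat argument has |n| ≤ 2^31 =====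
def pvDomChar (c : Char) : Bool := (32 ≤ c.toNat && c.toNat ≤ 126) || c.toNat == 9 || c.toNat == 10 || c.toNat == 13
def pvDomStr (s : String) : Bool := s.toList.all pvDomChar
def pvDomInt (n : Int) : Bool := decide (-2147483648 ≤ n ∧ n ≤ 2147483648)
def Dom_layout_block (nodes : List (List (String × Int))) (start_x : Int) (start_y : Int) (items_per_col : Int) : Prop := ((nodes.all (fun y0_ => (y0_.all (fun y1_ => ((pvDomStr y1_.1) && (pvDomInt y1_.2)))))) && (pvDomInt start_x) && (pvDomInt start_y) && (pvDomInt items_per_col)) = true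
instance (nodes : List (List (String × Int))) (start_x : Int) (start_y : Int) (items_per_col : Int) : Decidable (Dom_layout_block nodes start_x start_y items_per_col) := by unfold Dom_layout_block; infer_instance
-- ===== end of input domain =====

-- B replaces A's flat counter loop (current_col/current_row with a reset branch) by a recursive
-- column-chunking decomposition with a closed-form width (objective: alternative).
-- Both A and B also set each node's 'x'/'y' keys in place identically; the equivalence proved
-- here is about the RETURN value only.

-- ===== PORT A =====
-- loop body of A (current_col, current_row, max_y as the fold state)
def stepA (start_x start_y items_per_col : Int) (s : Int × Int × Int) (node : List (String × Int)) : Int × Int × Int :=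
  let _x := start_x + s.1 * 300
  let ny := start_y + s.2.1 * 220
  let node_h := (PySem.Dict.mk node).getD "height" 220
  let my := if ny + node_h > s.2.2 then ny + node_h else s.2.2
  let cr := s.2.1 + 1
  if cr ≥ items_per_col then (s.1 + 1, 0, my) else (s.1, cr, my)

def layout_block (nodes : List (List (String × Int))) (start_x : Int) (start_y : Int) (items_per_col : Int) : Int × Int :=
  let st := nodes.foldl (stepA start_x start_y items_per_col) (0, 0, start_y)
  ((st.1 + 1) * 300, st.2.2)

-- ===== PORT B =====
-- place(chunk, x): enumerate loop over one column; state = (row, best)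
def placeB (start_y : Int) (chunk : List (List (String × Int))) (_x : Int) : Int :=
  (chunk.foldl (fun (s : Int × Int) node =>
      let ny := start_y + s.1 * 220
      (s.1 + 1, max s.2 (ny + (PySem.Dict.mk node).getD "height" 220))) ((0 : Int), start_y)).2

-- the while loop: state (rest, x, max_y); one column slice consumed per iteration.
-- The Nat fuel is totality scaffolding only: under Pre_ (items_per_col > 0) the loop
-- runs at most len(nodes) times, so fuel = len(nodes) + 1 is never exhausted.
def goB (start_y items_per_col : Int) : Nat → List (List (String × Int)) → Int → Int → Int
  | 0, _, _, max_y => max_y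
  | fuel + 1, rest, x, max_y =>
    if rest = [] then max_y
    else goB start_y items_per_col fuel (PySem.List.slice rest (some items_per_col) none) (x + 300)
           (max max_y (placeB start_y (PySem.List.slice rest none (some items_per_col)) x))

def layout_block_alt (nodes : List (List (String × Int))) (start_x : Int) (start_y : Int) (items_per_col : Int) : Int × Int :=
  let max_y := goB start_y items_per_col (nodes.length + 1) nodes start_x start_y
  ((PySem.Int.floordiv (PySem.List.len nodes) items_per_col + 1) * 300, max_y)

-- ===== PRECONDITION & SPEC =====
-- Pre_ excludes non-positive items_per_col (not a meaningful column capacity): there A's reset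
-- branch fires every iteration and A returns, while B's column loop never consumes the
-- remainder slice and diverges.
def Pre_layout_block (nodes : List (List (String × Int))) (start_x : Int) (start_y : Int) (items_per_col : Int) : Prop := 0 < items_per_col
instance (nodes : List (List (String × Int))) (start_x : Int) (start_y : Int) (items_per_col : Int) : Decidable (Pre_layout_block nodes start_x start_y items_per_col) := by unfold Pre_layout_block; infer_instance

def pvWitness_layout_block : (List (List (String × Int))) × Int × Int × Int := ([[("height", 100)], []], 10, 20, 2)

def Spec_layout_block (nodes : List (List (String × Int))) (start_x : Int) (start_y : Int) (items_per_col : Int) (out : Int × Int) : Prop := out = layout_block_alt nodes start_x start_y items_per_col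
instance (nodes : List (List (String × Int))) (start_x : Int) (start_y : Int) (items_per_col : Int) (out : Int × Int) : Decidable (Spec_layout_block nodes start_x start_y items_per_col out) := by unfold Spec_layout_block; infer_instance

-- ===== CLAIM (what is proved, stated in full; the proofs are below) =====
def Claim_equal_layout_block : Prop := ∀ (nodes : List (List (String × Int))) (start_x : Int) (start_y : Int) (items_per_col : Int), Dom_layout_block nodes start_x start_y items_per_col → Pre_layout_block nodes start_x start_y items_per_col → Spec_layout_block nodes start_x start_y items_per_col (layout_block nodes start_x start_y items_per_col)

-- ===== LEMMAS AND PROOFS =====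

-- max_y accumulation over one column, with an explicit starting row and seed (proof helper)
def rowFold (sy : Int) : List (List (String × Int)) → Int → Int → Int
  | [], _, my => my
  | n :: t, row, my => rowFold sy t (row + 1) (max my (sy + row * 220 + (PySem.Dict.mk n).getD "height" 220))

lemma placeB_eq (sy x : Int) (chunk : List (List (String × Int))) :
    placeB sy chunk x = rowFold sy chunk 0 sy := by
  suffices h : ∀ (c : List (List (String × Int))) (r m : Int),
      (c.foldl (fun (s : Int × Int) node =>
        (s.1 + 1, max s.2 (sy + s.1 * 220 + (PySem.Dict.mk node).getD "height" 220))) (r, m)).2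
        = rowFold sy c r m by
    simpa [placeB] using h chunk 0 sy
  intro c
  induction c with
  | nil => intro r m; simp [rowFold]
  | cons n t ih => intro r m; simp [rowFold, ih]

lemma rowFold_max (sy : Int) :
    ∀ (chunk : List (List (String × Int))) (row a b : Int),
      rowFold sy chunk row (max a b) = max a (rowFold sy chunk row b) := by
  intro chunk
  induction chunk with
  | nil => intro row a b; simp [rowFold]
  | cons n t ih =>
    intro row a b
    simp only [rowFold, max_assoc]
    exact ih _ _ _

lemma rowFold_le (sy : Int) :
    ∀ (chunk : List (List (String × Int))) (row my : Int), my ≤ rowFold sy chunk row my := by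
  intro chunk
  induction chunk with
  | nil => intro row my; simp [rowFold]
  | cons n t ih =>
    intro row my
    exact le_trans (le_max_left _ _) (ih (row + 1) _)

lemma goB_nil (sy ipc x my : Int) (fuel : Nat) : goB sy ipc fuel [] x my = my := by
  cases fuel <;> simp [goB]

-- A's fold over a single column chunk (length ≤ items_per_col), from row start `row`
lemma foldA_chunk (sx sy ipc : Int) (hpos : 0 < ipc) :
    ∀ (chunk : List (List (String × Int))) (col row my : Int), 0 ≤ row →
      row + (chunk.length : Int) ≤ ipc →
      List.foldl (stepA sx sy ipc) (col, row, my) chunk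
        = ((if row + (chunk.length : Int) ≥ ipc ∧ chunk ≠ [] then col + 1 else col),
           (if row + (chunk.length : Int) ≥ ipc ∧ chunk ≠ [] then 0 else row + (chunk.length : Int)),
           rowFold sy chunk row my) := by
  intro chunk
  induction chunk with
  | nil =>
    intro col row my h0 hle
    simp [rowFold]
  | cons n t ih =>
    intro col row my h0 hle
    have hlen : ((n :: t).length : Int) = (t.length : Int) + 1 := by
      push_cast [List.length_cons]; ring
    have hmax : (if sy + row * 220 + (PySem.Dict.mk n).getD "height" 220 > my
          then sy + row * 220 + (PySem.Dict.mk n).getD "height" 220 else my)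
        = max my (sy + row * 220 + (PySem.Dict.mk n).getD "height" 220) := by
      rw [max_def]; split_ifs <;> omega
    simp only [List.foldl_cons]
    by_cases hb : row + 1 ≥ ipc
    · -- the reset branch: forces t = [] and ipc = row + 1
      have ht : t = [] := by
        cases t with
        | nil => rfl
        | cons a b =>
          exfalso
          have : (1 : Int) ≤ ((a :: b).length : Int) := by
            have := List.length_pos_iff.mpr (List.cons_ne_nil a b)
            exact_mod_cast this
          rw [hlen] at hle; omega
      subst ht
      have hstep : stepA sx sy ipc (col, row, my) n
          = (col + 1, 0, max my (sy + row * 220 + (PySem.Dict.mk n).getD "height" 220)) := by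
        simp only [stepA, hmax]
        rw [if_pos hb]
      rw [hstep]
      have hc : (row + (([n] : List (List (String × Int))).length : Int) ≥ ipc ∧
          ([n] : List (List (String × Int))) ≠ []) :=
        ⟨by simp only [List.length_cons, List.length_nil]; push_cast; omega, by simp⟩
      rw [if_pos hc, if_pos hc]
      simp [rowFold]
    · have hstep : stepA sx sy ipc (col, row, my) n
          = (col, row + 1, max my (sy + row * 220 + (PySem.Dict.mk n).getD "height" 220)) := by
        simp only [stepA, hmax]
        rw [if_neg hb]
      rw [hstep,
        ih col (row + 1) _ (by omega) (by rw [hlen] at hle; omega)]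
      by_cases ht : t = []
      · subst ht
        have hthis : ¬ ((row + (([n] : List (List (String × Int))).length : Int) ≥ ipc) ∧
            ([n] : List (List (String × Int))) ≠ []) := by
          simp only [List.length_cons, List.length_nil]
          push_cast
          intro h
          exact hb (by omega)
        rw [if_neg hthis, if_neg hthis]
        simp [rowFold]
      · have hcast : row + 1 + (t.length : Int) = row + ((n :: t).length : Int) := by
          rw [hlen]; ring
        by_cases hge : row + ((n :: t).length : Int) ≥ ipc
        · have c1 : (row + 1 + (t.length : Int) ≥ ipc ∧ t ≠ []) := ⟨by omega, ht⟩
          have c2 : (row + ((n :: t).length : Int) ≥ ipc ∧ (n :: t) ≠ []) := ⟨hge, by simp⟩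
          rw [if_pos c1, if_pos c1, if_pos c2, if_pos c2]
          simp [rowFold]
        · have c1 : ¬ (row + 1 + (t.length : Int) ≥ ipc ∧ t ≠ []) := by
            intro h; exact hge (by omega)
          have c2 : ¬ (row + ((n :: t).length : Int) ≥ ipc ∧ (n :: t) ≠ []) := by
            intro h; exact hge h.1
          rw [if_neg c1, if_neg c1, if_neg c2, if_neg c2]
          simp [rowFold]
          omega

-- Main invariant: A's flat fold equals B's column recursion, with divmod counters.
lemma main_inv (sx sy ipc : Int) (hpos : 0 < ipc) :
    ∀ (fuel : Nat) (nodes : List (List (String × Int))) (col my x : Int),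
      nodes.length < fuel → sy ≤ my →
      List.foldl (stepA sx sy ipc) (col, 0, my) nodes
        = (col + (nodes.length : Int) / ipc, (nodes.length : Int) % ipc,
           goB sy ipc fuel nodes x my) := by
  intro fuel
  induction fuel with
  | zero => intro nodes col my x hf _; omega
  | succ f ih =>
    intro nodes col my x hf hsymy
    by_cases hn : nodes = []
    · subst hn
      simp [goB]
    · have hipcN : ((ipc.toNat : Int)) = ipc := Int.toNat_of_nonneg (by omega)
      have hsplit : nodes = nodes.take ipc.toNat ++ nodes.drop ipc.toNat :=
        (List.take_append_drop _ _).symm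
      have hlenpos : 1 ≤ nodes.length := List.length_pos_iff.mpr hn
      have hslice1 : PySem.List.slice nodes none (some ipc) = nodes.take ipc.toNat :=
        PySem.List.slice_to _ (by omega)
      have hslice2 : PySem.List.slice nodes (some ipc) none = nodes.drop ipc.toNat :=
        PySem.List.slice_from _ (by omega)
      have hgo : goB sy ipc (f + 1) nodes x my
          = goB sy ipc f (nodes.drop ipc.toNat) (x + 300)
              (max my (placeB sy (nodes.take ipc.toNat) x)) := by
        simp only [goB, if_neg hn, hslice1, hslice2]
      by_cases hcase : nodes.length < ipc.toNat
      · -- one partial column: take = nodes, drop = []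
        have htake : nodes.take ipc.toNat = nodes := List.take_of_length_le (by omega)
        have hdrop : nodes.drop ipc.toNat = [] := List.drop_eq_nil_of_le (by omega)
        have hlt : (nodes.length : Int) < ipc := by omega
        have hchunk := foldA_chunk sx sy ipc hpos nodes col 0 my le_rfl (by omega)
        have hnocond : ¬ ((0 : Int) + (nodes.length : Int) ≥ ipc ∧ nodes ≠ []) := by
          intro h; omega
        rw [if_neg hnocond, if_neg hnocond] at hchunk
        rw [hchunk, hgo, htake, hdrop, goB_nil, placeB_eq]
        have hdiv : (nodes.length : Int) / ipc = 0 :=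
          Int.ediv_eq_zero_of_lt (by omega) hlt
        have hmod : (nodes.length : Int) % ipc = (nodes.length : Int) :=
          Int.emod_eq_of_lt (by omega) hlt
        have hmy : rowFold sy nodes 0 my = max my (rowFold sy nodes 0 sy) := by
          conv_lhs => rw [(max_eq_left hsymy).symm]
          exact rowFold_max sy nodes 0 my sy
        rw [hdiv, hmod, hmy]
        simp
      · -- one full column then recurse on the remainder
        have htlen : (nodes.take ipc.toNat).length = ipc.toNat := by
          rw [List.length_take]; omega
        have htne : nodes.take ipc.toNat ≠ [] := by
          intro h
          have := congrArg List.length h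
          rw [htlen] at this
          simp at this
          omega
        have hchunk := foldA_chunk sx sy ipc hpos (nodes.take ipc.toNat) col 0 my le_rfl
          (by rw [htlen]; omega)
        have hcond : ((0 : Int) + ((nodes.take ipc.toNat).length : Int) ≥ ipc ∧
            nodes.take ipc.toNat ≠ []) := by
          constructor
          · rw [htlen]; omega
          · exact htne
        rw [if_pos hcond, if_pos hcond] at hchunk
        have hdlen : (nodes.drop ipc.toNat).length = nodes.length - ipc.toNat := by
          rw [List.length_drop]
        have hrec := ih (nodes.drop ipc.toNat) (col + 1) (rowFold sy (nodes.take ipc.toNat) 0 my)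
          (x + 300) (by omega) (le_trans hsymy (rowFold_le sy _ 0 my))
        have hseed : max my (placeB sy (nodes.take ipc.toNat) x)
            = rowFold sy (nodes.take ipc.toNat) 0 my := by
          rw [placeB_eq]
          conv_rhs => rw [(max_eq_left hsymy).symm]
          exact (rowFold_max sy _ 0 my sy).symm
        conv_lhs => rw [hsplit]
        rw [List.foldl_append, hchunk, hrec, hgo, hseed]
        have hlenInt : (nodes.length : Int) = ((nodes.drop ipc.toNat).length : Int) + 1 * ipc := by
          rw [hdlen]; push_cast [Nat.cast_sub (by omega : ipc.toNat ≤ nodes.length)]; omega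
        have hdiv : (nodes.length : Int) / ipc = ((nodes.drop ipc.toNat).length : Int) / ipc + 1 := by
          rw [hlenInt, Int.add_mul_ediv_right _ _ (by omega : ipc ≠ 0)]
        have hmod : (nodes.length : Int) % ipc = ((nodes.drop ipc.toNat).length : Int) % ipc := by
          rw [hlenInt, Int.add_mul_emod_self_right]
        rw [hdiv, hmod]
        ring_nf

-- ===== VERDICT (by name: the statement is the Claim_ definition above) =====
theorem layout_block_spec : Claim_equal_layout_block := by
  intro nodes sx sy ipc _ hpre
  have hpos : 0 < ipc := hpre
  unfold Spec_layout_block layout_block layout_block_alt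
  rw [main_inv sx sy ipc hpos (nodes.length + 1) nodes 0 sy sx (by omega) le_rfl]
  simp [PySem.Int.floordiv_eq_ediv_of_pos hpos, PySem.List.len_eq]
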